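-- pv_equiv track=rewrite | github.com/BendayLang/Benday-python | fuzzy_finder.py | _does_match
-- ===== SOURCE A (Python) =====
-- def _does_match(element: str, query: str) -> int:
-- 	element = element.lower()
-- 	query = query.lower()
-- 	count = 0
-- 	for c in query:
-- 		found = element.find(c)
-- 		count += found
-- 		if found == -1:
-- 			return -1
-- 		element = element[found + 1:]
-- 	return count
-- ===== SOURCE B (Python) =====
-- def _does_match(element: str, query: str) -> int:
--     element = element.lower()
--     query = query.lower()
--     qi = 0
--     start = 0
--     count = 0
--     for pos, ch in enumerate(element):
--         if qi == len(query):
--             break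
--         if ch == query[qi]:
--             count += pos - start
--             start = pos + 1
--             qi += 1
--     return count if qi == len(query) else -1
-- ===== Notes on version B (the rewrite author's own statement) =====
-- stated objective: faster
-- what changed: B makes a single pass over element with enumerate, advancing a pointer into query and adding pos-start on each match, instead of A's loop over query that calls element.find(c) and re-slices element[found+1:] for every query character.
import Mathlib
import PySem

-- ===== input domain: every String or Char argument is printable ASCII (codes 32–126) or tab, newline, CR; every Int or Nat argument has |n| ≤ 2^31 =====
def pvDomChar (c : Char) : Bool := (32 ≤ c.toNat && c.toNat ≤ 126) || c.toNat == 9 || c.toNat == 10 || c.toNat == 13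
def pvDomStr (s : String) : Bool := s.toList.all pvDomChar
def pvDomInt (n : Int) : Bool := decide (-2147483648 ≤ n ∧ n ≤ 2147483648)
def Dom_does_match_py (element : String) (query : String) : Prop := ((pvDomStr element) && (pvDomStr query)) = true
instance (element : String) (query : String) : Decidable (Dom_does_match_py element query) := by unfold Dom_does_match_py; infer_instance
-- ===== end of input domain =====

-- B replaces A's loop over query (element.find(c) + re-slicing element[found+1:] each step)
-- by a single enumerate pass over element with a pointer into query; objective: faster.


-- ===== PORT A =====
-- A's loop over query: find c in the remaining element, add the offset, slice past the match.
def pvALoop (element : List Char) (count : Int) (query : List Char) : Int :=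
  match query with
  | [] => count
  | c :: qs =>
    let found := PySem.Chars.find element [c]
    let count' := count + found
    if found = -1 then -1
    else pvALoop (PySem.Chars.slice element (some (found + 1)) none) count' qs

def does_match_py (element : String) (query : String) : Int :=
  pvALoop (PySem.Chars.lower element.toList) 0 (PySem.Chars.lower query.toList)

-- ===== PORT B =====
-- B's loop: enumerate over element (pos counts up); the remaining query list plays the
-- role of the qi pointer (its head is query[qi]); break when it is empty; at the end
-- return count if the whole query was consumed, else -1.
def pvBScan (element : List Char) (pos : Int) (query : List Char)
    (start : Int) (count : Int) : Int :=
  match element with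
  | [] => if query = [] then count else -1
  | ch :: es =>
    match query with
    | [] => count                             -- the 'break' when qi == len(query)
    | c :: qs =>
      if ch = c then pvBScan es (pos + 1) qs (pos + 1) (count + (pos - start))
      else pvBScan es (pos + 1) (c :: qs) start count

def does_match_py_alt (element : String) (query : String) : Int :=
  pvBScan (PySem.Chars.lower element.toList) 0 (PySem.Chars.lower query.toList) 0 0

-- ===== PRECONDITION & SPEC =====
def Spec_does_match_py (element : String) (query : String) (out : Int) : Prop := out = does_match_py_alt element query
instance (element : String) (query : String) (out : Int) : Decidable (Spec_does_match_py element query out) := by unfold Spec_does_match_py; infer_instance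

-- ===== CLAIM (what is proved, stated in full; the proofs are below) =====
def Claim_equal_does_match_py : Prop := ∀ (element : String) (query : String), Dom_does_match_py element query → Spec_does_match_py element query (does_match_py element query)

-- ===== LEMMAS AND PROOFS =====
-- find is the unique index with a prefix occurrence and none before it
lemma pv_find_unique (el sub : List Char) (f : Nat)
    (h1 : sub <+: el.drop f) (h2 : ∀ i < f, ¬ sub <+: el.drop i) :
    PySem.Chars.find el sub = (f : Int) := by
  have hin : PySem.Chars.isIn sub el = true :=
    (PySem.Chars.exists_prefix_drop_iff_isIn _ _).mp ⟨f, h1⟩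
  have hinf : sub <:+: el := (PySem.Chars.isIn_iff_infix _ _).mp hin
  have h0 : 0 ≤ PySem.Chars.find el sub := (PySem.Chars.find_nonneg_iff _ _).mpr hinf
  obtain ⟨hpre, hmin⟩ := PySem.Chars.find_spec (s := el) (sub := sub) h0
  rcases lt_trichotomy (PySem.Chars.find el sub).toNat f with h | h | h
  · exact absurd hpre (h2 _ h)
  · omega
  · exact absurd h1 (hmin f h)

-- a one-character list is a prefix of a cons iff it starts with that character
lemma pv_single_prefix_cons (c e : Char) (es : List Char) :
    [c] <+: (e :: es) ↔ c = e := by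
  constructor
  · rintro ⟨t, ht⟩; simpa using congrArg List.head? ht
  · rintro rfl; exact ⟨es, rfl⟩

-- cons unfolding of find for a single-character needle
lemma pv_find_cons (e c : Char) (es : List Char) :
    PySem.Chars.find (e :: es) [c] =
      if e = c then 0
      else if PySem.Chars.find es [c] = -1 then -1 else PySem.Chars.find es [c] + 1 := by
  by_cases hec : e = c
  · rw [if_pos hec]
    exact pv_find_unique (e :: es) [c] 0
      (by simpa using (pv_single_prefix_cons c e es).mpr hec.symm)
      (by intro i hi; omega)
  · rw [if_neg hec]
    by_cases hf : PySem.Chars.find es [c] = -1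
    · rw [if_pos hf]
      rw [PySem.Chars.find_eq_neg_one_iff] at hf ⊢
      intro hinf
      obtain ⟨j, hj⟩ := (PySem.Chars.exists_prefix_drop_iff_isIn _ _).mpr
        ((PySem.Chars.isIn_iff_infix _ _).mpr hinf)
      cases j with
      | zero =>
        simp only [List.drop_zero] at hj
        exact hec ((pv_single_prefix_cons c e es).mp hj).symm
      | succ j =>
        exact hf ((PySem.Chars.isIn_iff_infix _ _).mp
          ((PySem.Chars.exists_prefix_drop_iff_isIn _ _).mp ⟨j, by simpa using hj⟩))
    · rw [if_neg hf]
      have h0 : 0 ≤ PySem.Chars.find es [c] := by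
        have := PySem.Chars.neg_one_le_find es [c]; omega
      obtain ⟨hpre, hmin⟩ := PySem.Chars.find_spec (s := es) (sub := [c]) h0
      have huniq := pv_find_unique (e :: es) [c] ((PySem.Chars.find es [c]).toNat + 1)
        (by simpa using hpre)
        (by
          intro i hi
          cases i with
          | zero =>
            simp only [List.drop_zero]
            intro hp
            exact hec ((pv_single_prefix_cons c e es).mp hp).symm
          | succ i => simpa using hmin i (by omega))
      rw [huniq]; omega

-- A's loop step when the current character is not found
lemma pvALoop_step_none (el : List Char) (count : Int) (c : Char) (qs : List Char)
    (hf : PySem.Chars.find el [c] = -1) : pvALoop el count (c :: qs) = -1 := by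
  simp only [pvALoop]; rw [if_pos hf]

-- A's loop step when the current character is found: slice becomes a drop
lemma pvALoop_step_found (el : List Char) (count : Int) (c : Char) (qs : List Char)
    (hf : PySem.Chars.find el [c] ≠ -1) :
    pvALoop el count (c :: qs)
      = pvALoop (el.drop ((PySem.Chars.find el [c]).toNat + 1))
          (count + PySem.Chars.find el [c]) qs := by
  have h0 : 0 ≤ PySem.Chars.find el [c] := by
    have := PySem.Chars.neg_one_le_find el [c]; omega
  simp only [pvALoop]; rw [if_neg hf]
  congr 1
  rw [PySem.Chars.slice_eq_listSlice, PySem.List.slice_from _ (by omega)]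
  congr 1; omega

-- B's scan over element equals A's find/slice loop over query
lemma pv_scan_eq (el : List Char) : ∀ (q : List Char) (pos start count : Int),
    pvBScan el pos q start count =
      match q with
      | [] => count
      | _ :: _ => pvALoop el (count + (pos - start)) q := by
  induction el with
  | nil =>
    intro q pos start count
    cases q with
    | nil => simp [pvBScan]
    | cons c qs =>
      have hf : PySem.Chars.find ([] : List Char) [c] = -1 := by
        rw [PySem.Chars.find_eq_neg_one_iff, List.infix_nil]
        simp
      simp only [pvBScan]
      rw [pvALoop_step_none _ _ _ _ hf]
      simp
  | cons e es ih =>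
    intro q pos start count
    cases q with
    | nil => simp [pvBScan]
    | cons c qs =>
      by_cases hec : e = c
      · have hfind : PySem.Chars.find (e :: es) [c] = 0 := by
          rw [pv_find_cons, if_pos hec]
        simp only [pvBScan]
        rw [if_pos hec, ih qs (pos + 1) (pos + 1) (count + (pos - start))]
        rw [pvALoop_step_found _ _ _ _ (by rw [hfind]; decide), hfind]
        cases qs with
        | nil => simp [pvALoop]
        | cons c' qs' =>
          show pvALoop es (count + (pos - start) + (pos + 1 - (pos + 1))) (c' :: qs') = _
          have h1 : List.drop (Int.toNat 0 + 1) (e :: es) = es := rfl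
          have h2 : count + (pos - start) + (pos + 1 - (pos + 1))
              = count + (pos - start) + 0 := by ring
          rw [h1, h2]
      · simp only [pvBScan]
        rw [if_neg hec, ih (c :: qs) (pos + 1) start count]
        by_cases hf : PySem.Chars.find es [c] = -1
        · have hfc : PySem.Chars.find (e :: es) [c] = -1 := by
            rw [pv_find_cons, if_neg hec, if_pos hf]
          rw [pvALoop_step_none _ _ _ _ hf, pvALoop_step_none _ _ _ _ hfc]
        · have h0 : 0 ≤ PySem.Chars.find es [c] := by
            have := PySem.Chars.neg_one_le_find es [c]; omega
          have hfc : PySem.Chars.find (e :: es) [c] = PySem.Chars.find es [c] + 1 := by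
            rw [pv_find_cons, if_neg hec, if_neg hf]
          rw [pvALoop_step_found _ _ _ _ hf,
            pvALoop_step_found _ _ _ _ (by rw [hfc]; omega), hfc]
          have hdrop : (e :: es).drop ((PySem.Chars.find es [c] + 1).toNat + 1)
              = es.drop ((PySem.Chars.find es [c]).toNat + 1) := by
            have : (PySem.Chars.find es [c] + 1).toNat
                = (PySem.Chars.find es [c]).toNat + 1 := by omega
            rw [this]; rfl
          rw [hdrop]
          have h2 : count + (pos + 1 - start) + PySem.Chars.find es [c]
              = count + (pos - start) + (PySem.Chars.find es [c] + 1) := by ring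
          rw [h2]

-- ===== VERDICT (by name: the statement is the Claim_ definition above) =====
theorem does_match_py_spec : Claim_equal_does_match_py := by
  intro element query _
  unfold Spec_does_match_py does_match_py does_match_py_alt
  rw [pv_scan_eq]
  cases h : PySem.Chars.lower query.toList with
  | nil => simp [pvALoop]
  | cons c qs => simp
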